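-- pv_equiv track=rewrite | github.com/oss-esso/OQI-UC002-DWave | @todo/adaptive_hybrid_solver.py | _stitch_cluster_solutions
-- ===== SOURCE A (Python) =====
-- from collections import defaultdict
--
-- def _stitch_cluster_solutions(clusters, cluster_solutions, overlap_farms):
--     """Merge cluster solutions, handling overlapping farms."""
--     combined = {}
--     farm_assignments = defaultdict(list)
--
--     for cluster_idx, (cluster, sol) in enumerate(zip(clusters, cluster_solutions)):
--         for (farm, family, period), value in sol.items():
--             if value == 1:
--                 farm_assignments[(farm, period)].append((family, cluster_idx))
--
--     for (farm, period), assignments in farm_assignments.items():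
--         if len(assignments) == 1:
--             family, _ = assignments[0]
--             combined[(farm, family, period)] = 1
--         else:
--             family, _ = assignments[-1]
--             combined[(farm, family, period)] = 1
--
--     return combined
-- ===== SOURCE B (Python) =====
-- def _stitch_cluster_solutions(clusters, cluster_solutions, overlap_farms):
--     """Merge cluster solutions, handling overlapping farms."""
--     chosen = {}
--     for cluster, sol in zip(clusters, cluster_solutions):
--         for (farm, family, period), value in sol.items():
--             if value == 1:
--                 chosen[(farm, period)] = family
--     return {(farm, family, period): 1 for (farm, period), family in chosen.items()}
-- ===== Notes on version B (the rewrite author's own statement) =====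
-- stated objective: simpler
-- what changed: Replaces the two-phase defaultdict(list) accumulation plus a len-based second pass with a single pass keeping only the last winning family per (farm, period) in one dict, then a comprehension building the result; no per-slot assignment lists or length branch are kept.
import Mathlib
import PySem

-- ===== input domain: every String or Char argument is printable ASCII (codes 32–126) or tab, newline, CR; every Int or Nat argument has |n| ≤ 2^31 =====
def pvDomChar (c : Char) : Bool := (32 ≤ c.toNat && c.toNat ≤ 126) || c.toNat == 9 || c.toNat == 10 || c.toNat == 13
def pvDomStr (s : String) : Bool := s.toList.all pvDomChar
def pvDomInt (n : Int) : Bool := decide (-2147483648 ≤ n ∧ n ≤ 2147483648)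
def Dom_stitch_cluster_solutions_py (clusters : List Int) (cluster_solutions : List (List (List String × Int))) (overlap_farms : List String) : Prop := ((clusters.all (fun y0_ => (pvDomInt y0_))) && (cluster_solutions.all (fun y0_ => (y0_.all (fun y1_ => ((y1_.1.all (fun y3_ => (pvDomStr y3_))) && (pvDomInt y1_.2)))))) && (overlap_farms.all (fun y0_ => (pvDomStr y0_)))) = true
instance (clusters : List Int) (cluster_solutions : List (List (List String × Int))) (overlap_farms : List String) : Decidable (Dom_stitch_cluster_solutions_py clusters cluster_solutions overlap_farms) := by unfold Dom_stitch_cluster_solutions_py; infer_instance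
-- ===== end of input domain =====

-- B replaces A's two-phase defaultdict(list)+length-branch merge by one last-writer-wins dict
-- pass and a final comprehension (objective: simpler); return values proved equal under Pre_.


-- ===== PORT A =====
-- dict keys (farm, period) / (farm, family, period) are represented as List String.
def stitch_cluster_solutions_py (clusters : List Int) (cluster_solutions : List (List (List String × Int))) (overlap_farms : List String) : List (List String × Int) :=
  let farm_assignments : PySem.Dict (List String) (List (String × Int)) :=
    (PySem.List.enumerate (clusters.zip cluster_solutions)).foldl
      (fun fa ci =>
        ci.2.2.foldl
          (fun fa kv =>
            match kv.1 with
            | [farm, family, period] =>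
                if kv.2 = 1 then
                  fa.modify [farm, period] [] (fun l => l ++ [(family, ci.1)])
                else fa
            | _ => fa)  -- Python raises ValueError on a key that is not a 3-tuple; excluded by Pre_
          fa)
      PySem.Dict.empty
  let combined : PySem.Dict (List String) Int :=
    farm_assignments.items.foldl
      (fun c fpa =>
        match fpa.1 with
        | [farm, period] =>
            if PySem.List.len fpa.2 = 1 then
              match PySem.List.pyGet? fpa.2 0 with
              | some fc => c.insert [farm, fc.1, period] 1
              | none => c       -- unreachable: assignment lists are nonempty
            else
              match PySem.List.pyGet? fpa.2 (-1) with
              | some fc => c.insert [farm, fc.1, period] 1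
              | none => c       -- unreachable
        | _ => c)               -- unreachable: keys of farm_assignments have two components
      PySem.Dict.empty
  combined.items

-- ===== PORT B =====
-- tuple unpacking of the 3-component key is ported via a length test and positional access
-- (a key of another length makes Python raise ValueError; such inputs are excluded by Pre_).
def stitch_cluster_solutions_py_alt (clusters : List Int) (cluster_solutions : List (List (List String × Int))) (overlap_farms : List String) : List (List String × Int) :=
  let chosen : PySem.Dict (List String) String :=
    (clusters.zip cluster_solutions).foldl
      (fun ch cs =>
        cs.2.foldl
          (fun ch kv =>
            if kv.1.length = 3 then
              if kv.2 = 1 then ch.insert [kv.1.getD 0 "", kv.1.getD 2 ""] (kv.1.getD 1 "") else ch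
            else ch)
          ch)
      PySem.Dict.empty
  chosen.items.map (fun kf =>
    if kf.1.length = 2 then ([kf.1.getD 0 "", kf.2, kf.1.getD 1 ""], (1 : Int))
    else (kf.1, (1 : Int)))   -- unreachable: keys of chosen have two components

-- ===== PRECONDITION & SPEC =====
-- Pre_ excludes inputs where some iterated solution dict has a key that is not a 3-tuple:
-- there Python's tuple unpacking raises ValueError (in A and in B alike).
def Pre_stitch_cluster_solutions_py (clusters : List Int) (cluster_solutions : List (List (List String × Int))) (overlap_farms : List String) : Prop :=
  ∀ sol ∈ cluster_solutions.take clusters.length, ∀ p ∈ sol, p.1.length = 3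
instance (clusters : List Int) (cluster_solutions : List (List (List String × Int))) (overlap_farms : List String) : Decidable (Pre_stitch_cluster_solutions_py clusters cluster_solutions overlap_farms) := by unfold Pre_stitch_cluster_solutions_py; infer_instance

def pvWitness_stitch_cluster_solutions_py : List Int × (List (List (List String × Int))) × List String :=
  ([0, 1], [[(["f1", "wheat", "p1"], 1), (["f2", "corn", "p1"], 1)], [(["f1", "rye", "p1"], 1)]], ["f1"])

def Spec_stitch_cluster_solutions_py (clusters : List Int) (cluster_solutions : List (List (List String × Int))) (overlap_farms : List String) (out : List (List String × Int)) : Prop := out = stitch_cluster_solutions_py_alt clusters cluster_solutions overlap_farms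
instance (clusters : List Int) (cluster_solutions : List (List (List String × Int))) (overlap_farms : List String) (out : List (List String × Int)) : Decidable (Spec_stitch_cluster_solutions_py clusters cluster_solutions overlap_farms out) := by unfold Spec_stitch_cluster_solutions_py; infer_instance

-- ===== CLAIM (what is proved, stated in full; the proofs are below) =====
def Claim_equal_stitch_cluster_solutions_py : Prop := ∀ (clusters : List Int) (cluster_solutions : List (List (List String × Int))) (overlap_farms : List String), Dom_stitch_cluster_solutions_py clusters cluster_solutions overlap_farms → Pre_stitch_cluster_solutions_py clusters cluster_solutions overlap_farms → Spec_stitch_cluster_solutions_py clusters cluster_solutions overlap_farms (stitch_cluster_solutions_py clusters cluster_solutions overlap_farms)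

-- ===== LEMMAS AND PROOFS =====

-- the family A's second pass extracts from a nonempty assignment list (its last element's family)
def pvLastFam (l : List (String × Int)) : String := ((l.getLast?).map Prod.fst).getD ""

-- B's dict reconstructed from A's defaultdict: same keys in the same order, last family as value
def pvMkOf (fa : PySem.Dict (List String) (List (String × Int))) : PySem.Dict (List String) String :=
  PySem.Dict.mk (fa.items.map (fun p => (p.1, pvLastFam p.2)))

-- invariant of A's first loop
def pvGood (fa : PySem.Dict (List String) (List (String × Int))) : Prop :=
  fa.keys.Nodup ∧ ∀ p ∈ fa.items, p.1.length = 2 ∧ p.2 ≠ []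

theorem pv_modify_eq_insert (d : PySem.Dict (List String) (List (String × Int))) (k : List String) (f : List (String × Int) → List (String × Int)) :
    d.modify k [] f = d.insert k (f (d.getD k [])) := rfl

theorem pv_keys_mkOf (fa : PySem.Dict (List String) (List (String × Int))) : (pvMkOf fa).keys = fa.keys := by
  simp [pvMkOf, PySem.Dict.keys]

theorem pv_contains_mkOf (fa : PySem.Dict (List String) (List (String × Int))) (k : List String) :
    (pvMkOf fa).contains k = fa.contains k := by
  rw [PySem.Dict.contains_eq_decide_mem_keys, PySem.Dict.contains_eq_decide_mem_keys, pv_keys_mkOf]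

theorem pv_mkOf_insert (fa : PySem.Dict (List String) (List (String × Int))) (k : List String) (fam : String) (idx : Int) :
    pvMkOf (fa.insert k (fa.getD k [] ++ [(fam, idx)])) = (pvMkOf fa).insert k fam := by
  apply PySem.Dict.ext
  show ((fa.insert k (fa.getD k [] ++ [(fam, idx)])).items.map (fun p => (p.1, pvLastFam p.2)))
      = ((pvMkOf fa).insert k fam).items
  rw [PySem.Dict.items_insert, PySem.Dict.items_insert, pv_contains_mkOf]
  by_cases h : fa.contains k = true
  · simp only [h, if_true]
    show (fa.items.map _).map _ = ((pvMkOf fa).items.map _)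
    simp only [pvMkOf, List.map_map]
    apply List.map_congr_left
    intro p _
    by_cases hk : (p.1 == k) = true
    · simp [Function.comp, hk, pvLastFam]
    · simp [Function.comp, hk]
  · simp only [h]
    show (fa.items ++ [(k, fa.getD k [] ++ [(fam, idx)])]).map _ = (pvMkOf fa).items ++ [(k, fam)]
    simp [pvMkOf, pvLastFam]

theorem pv_good_insert (fa : PySem.Dict (List String) (List (String × Int))) (k : List String) (fam : String) (idx : Int)
    (hG : pvGood fa) (hk : k.length = 2) :
    pvGood (fa.insert k (fa.getD k [] ++ [(fam, idx)])) := by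
  obtain ⟨hnd, hmem⟩ := hG
  refine ⟨PySem.Dict.nodup_keys_insert _ _ _ hnd, ?_⟩
  intro p hp
  rw [PySem.Dict.mem_items_insert] at hp
  rcases hp with h | ⟨h, _⟩
  · subst h; exact ⟨hk, by simp⟩
  · exact hmem p h

-- one entry of one solution dict: the two loop bodies stay in the pvMkOf relation
theorem pv_step (fa : PySem.Dict (List String) (List (String × Int))) (idx : Int) (kv : List String × Int)
    (hG : pvGood fa) :
    pvGood (match kv.1 with
        | [farm, family, period] =>
            if kv.2 = 1 then fa.modify [farm, period] [] (fun l => l ++ [(family, idx)]) else fa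
        | _ => fa) ∧
    pvMkOf (match kv.1 with
        | [farm, family, period] =>
            if kv.2 = 1 then fa.modify [farm, period] [] (fun l => l ++ [(family, idx)]) else fa
        | _ => fa)
      = (if kv.1.length = 3 then
          if kv.2 = 1 then (pvMkOf fa).insert [kv.1.getD 0 "", kv.1.getD 2 ""] (kv.1.getD 1 "") else pvMkOf fa
        else pvMkOf fa) := by
  match kv with
  | ([farm, family, period], v) =>
    by_cases hv : v = 1
    · simp only [hv, if_true, pv_modify_eq_insert, List.length_cons, List.length_nil, List.getD]
      exact ⟨pv_good_insert fa [farm, period] family idx hG rfl, by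
        have := pv_mkOf_insert fa [farm, period] family idx
        simpa using this⟩
    · simp only [hv, if_false]; exact ⟨hG, by simp⟩
  | ([], v) => exact ⟨hG, by simp⟩
  | ([a], v) => exact ⟨hG, by simp⟩
  | ([a, b], v) => exact ⟨hG, by simp⟩
  | (a :: b :: c :: d :: rest, v) => exact ⟨hG, by simp [List.length_cons]⟩

-- one solution dict (A's inner loop vs B's inner loop)
theorem pv_inner (sol : List (List String × Int)) (idx : Int) (fa : PySem.Dict (List String) (List (String × Int)))
    (hG : pvGood fa) :
    pvGood (sol.foldl (fun fa kv =>
        match kv.1 with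
        | [farm, family, period] =>
            if kv.2 = 1 then fa.modify [farm, period] [] (fun l => l ++ [(family, idx)]) else fa
        | _ => fa) fa) ∧
    pvMkOf (sol.foldl (fun fa kv =>
        match kv.1 with
        | [farm, family, period] =>
            if kv.2 = 1 then fa.modify [farm, period] [] (fun l => l ++ [(family, idx)]) else fa
        | _ => fa) fa)
      = sol.foldl (fun ch kv =>
        if kv.1.length = 3 then
          if kv.2 = 1 then ch.insert [kv.1.getD 0 "", kv.1.getD 2 ""] (kv.1.getD 1 "") else ch
        else ch) (pvMkOf fa) := by
  induction sol generalizing fa with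
  | nil => exact ⟨hG, rfl⟩
  | cons kv rest ih =>
    obtain ⟨hg1, he1⟩ := pv_step fa idx kv hG
    obtain ⟨hg2, he2⟩ := ih _ hg1
    refine ⟨hg2, ?_⟩
    rw [List.foldl_cons, List.foldl_cons]
    exact he2.trans (by rw [he1])

-- the whole first phase (A's outer loop over enumerate(zip …) vs B's loop over zip …)
theorem pv_outer (L : List (Int × (Int × List (List String × Int)))) (fa : PySem.Dict (List String) (List (String × Int)))
    (hG : pvGood fa) :
    pvGood (L.foldl (fun fa ci =>
        ci.2.2.foldl (fun fa kv =>
          match kv.1 with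
          | [farm, family, period] =>
              if kv.2 = 1 then fa.modify [farm, period] [] (fun l => l ++ [(family, ci.1)]) else fa
          | _ => fa) fa) fa) ∧
    pvMkOf (L.foldl (fun fa ci =>
        ci.2.2.foldl (fun fa kv =>
          match kv.1 with
          | [farm, family, period] =>
              if kv.2 = 1 then fa.modify [farm, period] [] (fun l => l ++ [(family, ci.1)]) else fa
          | _ => fa) fa) fa)
      = (L.map (·.2)).foldl (fun ch cs =>
          cs.2.foldl (fun ch kv =>
            if kv.1.length = 3 then
              if kv.2 = 1 then ch.insert [kv.1.getD 0 "", kv.1.getD 2 ""] (kv.1.getD 1 "") else ch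
            else ch) ch) (pvMkOf fa) := by
  induction L generalizing fa with
  | nil => exact ⟨hG, rfl⟩
  | cons ci rest ih =>
    obtain ⟨hg1, he1⟩ := pv_inner ci.2.2 ci.1 fa hG
    obtain ⟨hg2, he2⟩ := ih _ hg1
    refine ⟨hg2, ?_⟩
    rw [List.foldl_cons, List.map_cons, List.foldl_cons]
    exact he2.trans (by rw [he1])

-- the key A's second pass writes for an item of farm_assignments
def pvBigKey (p : List String × List (String × Int)) : List String :=
  match p.1 with
  | [farm, period] => [farm, pvLastFam p.2, period]
  | _ => p.1

theorem pv_extract (l : List (String × Int)) (h : l ≠ []) :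
    (if PySem.List.len l = 1 then PySem.List.pyGet? l 0 else PySem.List.pyGet? l (-1)) = l.getLast? := by
  by_cases h1 : l.length = 1
  · obtain ⟨a, rfl⟩ := List.length_eq_one_iff.mp h1
    simp [PySem.List.len_eq]
  · rw [if_neg (by simp [PySem.List.len_eq]; omega), PySem.List.pyGet?_neg_one]

theorem pv_shrink (p : List String × List (String × Int)) (h2 : p.1.length = 2) :
    (fun k : List String => match k with | [a, _, b] => [a, b] | _ => k) (pvBigKey p) = p.1 := by
  match hp : p.1, h2 with
  | [farm, period], _ => simp [pvBigKey, hp]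

-- A's second pass over the items of a good farm_assignments produces exactly B's map
theorem pv_final (fa : PySem.Dict (List String) (List (String × Int))) (hG : pvGood fa) :
    (fa.items.foldl (fun c fpa =>
        match fpa.1 with
        | [farm, period] =>
            if PySem.List.len fpa.2 = 1 then
              match PySem.List.pyGet? fpa.2 0 with
              | some fc => c.insert [farm, fc.1, period] 1
              | none => c
            else
              match PySem.List.pyGet? fpa.2 (-1) with
              | some fc => c.insert [farm, fc.1, period] 1
              | none => c
        | _ => c) (PySem.Dict.empty : PySem.Dict (List String) Int)).items
      = fa.items.map (fun p => (pvBigKey p, (1 : Int))) := by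
  obtain ⟨hnd, hmem⟩ := hG
  have hcongr : fa.items.foldl (fun c fpa =>
        match fpa.1 with
        | [farm, period] =>
            if PySem.List.len fpa.2 = 1 then
              match PySem.List.pyGet? fpa.2 0 with
              | some fc => c.insert [farm, fc.1, period] 1
              | none => c
            else
              match PySem.List.pyGet? fpa.2 (-1) with
              | some fc => c.insert [farm, fc.1, period] 1
              | none => c
        | _ => c) (PySem.Dict.empty : PySem.Dict (List String) Int)
      = fa.items.foldl (fun c p => c.insert (pvBigKey p) 1) PySem.Dict.empty := by
    apply PySem.List.foldl_congr_mem
    intro c p hp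
    obtain ⟨h2, hne⟩ := hmem p hp
    match hk : p.1, h2 with
    | [farm, period], _ =>
      have hlast : ∃ fc, p.2.getLast? = some fc := by
        cases hl : p.2.getLast? with
        | none => exact absurd (List.getLast?_eq_none_iff.mp hl) hne
        | some fc => exact ⟨fc, rfl⟩
      obtain ⟨fc, hfc⟩ := hlast
      have hext := pv_extract p.2 hne
      rw [hfc] at hext
      by_cases h1 : PySem.List.len p.2 = 1
      · rw [if_pos h1] at hext
        simp only [h1, if_true, hext, pvBigKey, hk, pvLastFam, hfc, Option.map_some, Option.getD_some]
      · rw [if_neg h1] at hext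
        simp only [h1, if_false, hext, pvBigKey, hk, pvLastFam, hfc, Option.map_some, Option.getD_some]
  rw [hcongr]
  rw [PySem.Dict.items_foldl_insert_fresh fa.items pvBigKey (fun _ => 1) PySem.Dict.empty
        (fun a _ => by simp) ?_]
  · rfl
  · apply List.Nodup.of_map (fun k : List String => match k with | [a, _, b] => [a, b] | _ => k)
    rw [List.map_map]
    have : fa.items.map ((fun k : List String => match k with | [a, _, b] => [a, b] | _ => k) ∘ pvBigKey)
        = fa.items.map (·.1) := by
      apply List.map_congr_left
      intro p hp
      exact pv_shrink p (hmem p hp).1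
    rw [this]
    exact hnd

theorem pv_mkOf_empty : pvMkOf PySem.Dict.empty = PySem.Dict.empty := rfl

theorem pv_good_empty : pvGood PySem.Dict.empty := by
  constructor
  · show (PySem.Dict.empty : PySem.Dict (List String) (List (String × Int))).keys.Nodup
    simp [PySem.Dict.empty, PySem.Dict.keys]
  · intro p hp
    simp [PySem.Dict.empty] at hp

-- ===== VERDICT (by name: the statement is the Claim_ definition above) =====
theorem stitch_cluster_solutions_py_spec : Claim_equal_stitch_cluster_solutions_py := by
  intro clusters cluster_solutions overlap_farms _ _
  show stitch_cluster_solutions_py clusters cluster_solutions overlap_farms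
      = stitch_cluster_solutions_py_alt clusters cluster_solutions overlap_farms
  unfold stitch_cluster_solutions_py stitch_cluster_solutions_py_alt
  dsimp only
  obtain ⟨hGfa, hmk⟩ := pv_outer (PySem.List.enumerate (clusters.zip cluster_solutions)) PySem.Dict.empty pv_good_empty
  rw [PySem.List.map_snd_enumerate, pv_mkOf_empty] at hmk
  rw [pv_final _ hGfa, ← hmk]
  obtain ⟨_, hmem⟩ := hGfa
  dsimp only [pvMkOf]
  rw [List.map_map]
  apply List.map_congr_left
  intro p hp
  have h2 := (hmem p hp).1
  match p, h2 with
  | ([farm, period], l), _ => simp [Function.comp, pvBigKey, List.getD]
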